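-- pv_equiv track=rewrite | github.com/Kawser-nerd/CLCDSA | Source Codes/CodeJamData/13/32/15.py | solve_small
-- ===== SOURCE A (Python) =====
-- def solve_small(case):
-- 	(x, y) = case
-- 	ans = ''
-- 	if x < 0:
-- 		while(x<0):
-- 			ans = ans + "EW"
-- 			x = x + 1
-- 	elif x > 0:
-- 		while(x>0):
-- 			ans = ans + "WE"
-- 			x = x - 1
-- 	if y < 0:
-- 		while(y<0):
-- 			ans = ans + "NS"
-- 			y = y + 1
-- 	elif y > 0:
-- 		while(y>0):
-- 			ans = ans + "SN"
-- 			y = y - 1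
-- 	return ans
-- ===== SOURCE B (Python) =====
-- def solve_small(case):
--     (x, y) = case
--     return ("EW" * (-x) if x < 0 else "WE" * x) + ("NS" * (-y) if y < 0 else "SN" * y)
-- ===== Notes on version B (the rewrite author's own statement) =====
-- stated objective: simpler
-- what changed: Replaces the four counting while-loops with a single expression using closed-form string multiplication for each coordinate's block, avoiding quadratic repeated concatenation.
import Mathlib
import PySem

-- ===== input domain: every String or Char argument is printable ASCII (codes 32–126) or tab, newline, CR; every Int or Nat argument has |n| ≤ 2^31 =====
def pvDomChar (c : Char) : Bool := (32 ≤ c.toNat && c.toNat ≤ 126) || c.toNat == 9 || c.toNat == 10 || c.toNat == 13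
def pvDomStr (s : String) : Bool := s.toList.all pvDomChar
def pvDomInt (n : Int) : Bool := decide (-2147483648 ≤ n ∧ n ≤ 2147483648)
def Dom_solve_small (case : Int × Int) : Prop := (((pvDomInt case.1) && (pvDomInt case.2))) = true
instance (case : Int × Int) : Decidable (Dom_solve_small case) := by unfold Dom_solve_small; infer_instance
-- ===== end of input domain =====

-- B replaces A's four counting while-loops by one expression of closed-form string repetitions (objective: simpler).

-- ===== PORT A =====
-- while x<0: ans = ans + tok; x = x + 1
def pvLoopNeg (tok : String) (ans : String) (x : Int) : String :=
  if x < 0 then pvLoopNeg tok (ans ++ tok) (x + 1) else ans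
  termination_by x.natAbs
  decreasing_by omega

-- while x>0: ans = ans + tok; x = x - 1
def pvLoopPos (tok : String) (ans : String) (x : Int) : String :=
  if x > 0 then pvLoopPos tok (ans ++ tok) (x - 1) else ans
  termination_by x.natAbs
  decreasing_by omega

def solve_small (case : Int × Int) : String :=
  let x := case.1
  let y := case.2
  let ans := ""
  let ans := if x < 0 then pvLoopNeg "EW" ans x
             else if x > 0 then pvLoopPos "WE" ans x else ans
  let ans := if y < 0 then pvLoopNeg "NS" ans y
             else if y > 0 then pvLoopPos "SN" ans y else ans
  ans

-- ===== PORT B =====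
-- Python "s" * n (empty for n ≤ 0)
def pvRep (s : String) (n : Nat) : String :=
  match n with
  | 0 => ""
  | Nat.succ m => s ++ pvRep s m

def solve_small_alt (case : Int × Int) : String :=
  (if case.1 < 0 then pvRep "EW" (-case.1).toNat else pvRep "WE" case.1.toNat) ++
  (if case.2 < 0 then pvRep "NS" (-case.2).toNat else pvRep "SN" case.2.toNat)

-- ===== PRECONDITION & SPEC =====
def Spec_solve_small (case : Int × Int) (out : String) : Prop := out = solve_small_alt case
instance (case : Int × Int) (out : String) : Decidable (Spec_solve_small case out) := by
  unfold Spec_solve_small; infer_instance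

-- ===== CLAIM =====
def Claim_equal_solve_small : Prop :=
  ∀ (case : Int × Int), Dom_solve_small case → Spec_solve_small case (solve_small case)

-- ===== LEMMAS AND PROOFS =====
theorem pvLoopNeg_eq (tok : String) :
    ∀ (n : Nat) (ans : String) (x : Int), (-x).toNat = n →
      pvLoopNeg tok ans x = ans ++ pvRep tok n := by
  intro n
  induction n with
  | zero =>
    intro ans x h
    unfold pvLoopNeg
    have : ¬ x < 0 := by omega
    simp [this, pvRep]
  | succ m ih =>
    intro ans x h
    have hx : x < 0 := by omega
    unfold pvLoopNeg
    rw [if_pos hx, ih (ans ++ tok) (x + 1) (by omega), pvRep, String.append_assoc]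

theorem pvLoopPos_eq (tok : String) :
    ∀ (n : Nat) (ans : String) (x : Int), x.toNat = n →
      pvLoopPos tok ans x = ans ++ pvRep tok n := by
  intro n
  induction n with
  | zero =>
    intro ans x h
    unfold pvLoopPos
    have : ¬ x > 0 := by omega
    simp [this, pvRep]
  | succ m ih =>
    intro ans x h
    have hx : x > 0 := by omega
    unfold pvLoopPos
    rw [if_pos hx, ih (ans ++ tok) (x - 1) (by omega), pvRep, String.append_assoc]

-- ===== VERDICT =====
theorem solve_small_spec : Claim_equal_solve_small := by
  unfold Claim_equal_solve_small
  intro case _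
  unfold Spec_solve_small solve_small solve_small_alt
  obtain ⟨x, y⟩ := case
  simp only
  by_cases hx : x < 0 <;> by_cases hy : y < 0 <;>
    simp only [hx, hy, if_pos, if_neg, not_false_iff]
  · rw [pvLoopNeg_eq "NS" (-y).toNat (pvLoopNeg "EW" "" x) y rfl,
        pvLoopNeg_eq "EW" (-x).toNat "" x rfl, String.empty_append]
  · by_cases hy' : y > 0
    · rw [if_pos hy', pvLoopPos_eq "SN" y.toNat (pvLoopNeg "EW" "" x) y rfl,
          pvLoopNeg_eq "EW" (-x).toNat "" x rfl, String.empty_append]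
    · have hy0 : y = 0 := by omega
      rw [if_neg hy', pvLoopNeg_eq "EW" (-x).toNat "" x rfl, String.empty_append]
      simp [hy0, pvRep]
  · by_cases hx' : x > 0
    · rw [if_pos hx', pvLoopNeg_eq "NS" (-y).toNat (pvLoopPos "WE" "" x) y rfl,
          pvLoopPos_eq "WE" x.toNat "" x rfl, String.empty_append]
    · have hx0 : x = 0 := by omega
      rw [if_neg hx', pvLoopNeg_eq "NS" (-y).toNat "" y rfl, String.empty_append]
      simp [hx0, pvRep]
  · by_cases hx' : x > 0 <;> by_cases hy' : y > 0
    · rw [if_pos hx', if_pos hy', pvLoopPos_eq "SN" y.toNat (pvLoopPos "WE" "" x) y rfl,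
          pvLoopPos_eq "WE" x.toNat "" x rfl, String.empty_append]
    · have hy0 : y = 0 := by omega
      rw [if_pos hx', if_neg hy', pvLoopPos_eq "WE" x.toNat "" x rfl, String.empty_append]
      simp [hy0, pvRep]
    · have hx0 : x = 0 := by omega
      rw [if_neg hx', if_pos hy', pvLoopPos_eq "SN" y.toNat "" y rfl, String.empty_append]
      simp [hx0, pvRep]
    · have hx0 : x = 0 := by omega
      have hy0 : y = 0 := by omega
      rw [if_neg hx', if_neg hy']
      simp [hx0, hy0, pvRep]
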